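-- pv_equiv track=rewrite | github.com/mlodyjesienin/Algorithms-Data-Structures-2023 | kolokwia/kol1/kol1.py | ksum
-- ===== SOURCE A (Python) =====
-- def partition(T,p,r,k):
--     for i in range(p,r+1):
--         if T[i] == k:
--             m = i
--             break
--     T[m], T[r] = T[r], T[m]
--     x = T[r]
--     i = p-1
--     for j in range(p,r):
--         if T[j] <= x:
--             i+=1
--             T[i], T[j] = T[j], T[i]
--     T[i+1], T[r] = T[r], T[i+1]
--     return i+1
--
-- def bubble_sort(T):
--     n = len(T)
--     for i in range(n):
--         for j in range(n-i-1):
--             if T[j] > T[j+1]: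
--                 T[j],T[j+1] = T[j+1], T[j]
--
-- def mediana_5(T,p,r):
--         T2 = []
--         if r - p +1 >=5:
--             q = 5
--         else:
--             q = r-p
--         for i in range(q):
--             T2.append(T[p+i])
--         bubble_sort(T2)
--         if len(T2)==0:
--             T2.append(T[p])
--         return T2[q//2]
--
-- def magiczne_piatki(T,p,r,k): #algorytm zwraca
--     if r<=p:
--         return T[r]
--     T_median = []
--     for i in range(p,r+1,5):
--         T_median.append(mediana_5(T,i,r))
--     n = len(T_median)
--     mediana_median = magiczne_piatki(T_median,0,n-1,n//2)
--     q = partition(T,p,r,mediana_median)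
--     if q==k:
--         return T[q]
--     elif q >k:
--         return magiczne_piatki(T,p,q-1,k)
--     else:
--         return magiczne_piatki(T,q+1,r,k)
--
-- def ksum(T, k, p):
--     suma = 0
--     n = len(T)
--     for i in range(n-p+1):
--         T2 = T[i:i+p]
--         a =magiczne_piatki(T2,0,p-1,p-k)
--         suma+=a
--
--
--     return suma
-- ===== SOURCE B (Python) =====
-- def ksum(T, k, p):
--     # sum of the k-th largest (i.e. (p-k)-th smallest) element of each length-p window
--     return sum(sorted(T[i:i + p])[p - k] for i in range(len(T) - p + 1))
-- ===== Notes on version B (the rewrite author's own statement) =====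
-- stated objective: simpler
-- what changed: A runs a hand-written median-of-medians quickselect (with swaps, partition and bubble-sorted 5-blocks) on a copy of every window; B simply sorts each window with the built-in sorted() and indexes the (p-k)-th element, a one-line comprehension.
-- outside the precondition, e.g. on ksum([1, 2, 3], 0, 2): A returns 5, B raises IndexError; on ksum([-5, -4, -4, 0, -3, 5, -1], 6, 3): A returns -6, B returns -19; on ksum([1, 2], 1, 0): A raises IndexError, B raises IndexError
import Mathlib
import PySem

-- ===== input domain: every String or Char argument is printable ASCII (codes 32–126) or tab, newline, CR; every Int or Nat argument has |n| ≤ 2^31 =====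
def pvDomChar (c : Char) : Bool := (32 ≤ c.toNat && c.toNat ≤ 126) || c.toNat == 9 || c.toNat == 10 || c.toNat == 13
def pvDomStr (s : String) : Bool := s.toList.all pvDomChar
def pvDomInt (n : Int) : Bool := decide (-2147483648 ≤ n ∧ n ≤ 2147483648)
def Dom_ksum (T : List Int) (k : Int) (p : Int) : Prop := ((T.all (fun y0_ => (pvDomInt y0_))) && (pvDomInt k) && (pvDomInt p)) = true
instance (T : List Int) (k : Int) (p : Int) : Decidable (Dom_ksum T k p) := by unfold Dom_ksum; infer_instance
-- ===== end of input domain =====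

-- B replaces A's hand-written median-of-medians quickselect per window by sorting each
-- window and indexing; equivalence is claimed for the return value only (A mutates only
-- its own window copies, so no caller-visible mutation is at stake).

-- ===== PORT A =====

-- Python 'T[a], T[b] = T[b], T[a]' (RHS tuple evaluated first, then the two assignments)
def pswap (T : List Int) (a b : Int) : List Int :=
  let x := PySem.List.pyGetD T b 0
  let y := PySem.List.pyGetD T a 0
  PySem.List.pySetD (PySem.List.pySetD T a x) b y

-- partition(T,p,r,k): the first loop-with-break is List.find? over range(p,r+1); Python
-- raises UnboundLocalError when k is absent — that branch (.getD r) is unreachable under Pre_.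
def partitionA (T : List Int) (p r k : Int) : List Int × Int :=
  let m := ((PySem.List.pyRange p (r+1) 1).find? (fun i => PySem.List.pyGetD T i 0 == k)).getD r
  let T1 := pswap T m r
  let x := PySem.List.pyGetD T1 r 0
  let s := (PySem.List.pyRange p r 1).foldl
      (fun (s : List Int × Int) j =>
        if PySem.List.pyGetD s.1 j 0 ≤ x then (pswap s.1 (s.2+1) j, s.2+1) else s)
      (T1, p-1)
  (pswap s.1 (s.2+1) r, s.2+1)

def bubbleSortA (T : List Int) : List Int :=
  let n := PySem.List.len T
  (PySem.List.pyRange 0 n 1).foldl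
    (fun T i =>
      (PySem.List.pyRange 0 (n - i - 1) 1).foldl
        (fun T j =>
          if PySem.List.pyGetD T (j+1) 0 < PySem.List.pyGetD T j 0 then pswap T j (j+1) else T)
        T)
    T

def mediana5A (T : List Int) (p r : Int) : Int :=
  let q : Int := if 5 ≤ r - p + 1 then 5 else r - p
  let T2 := (PySem.List.pyRange 0 q 1).foldl
      (fun T2 i => T2 ++ [PySem.List.pyGetD T (p+i) 0]) []
  let T2 := bubbleSortA T2
  let T2 := if T2.length = 0 then T2 ++ [PySem.List.pyGetD T p 0] else T2
  PySem.List.pyGetD T2 (PySem.Int.floordiv q 2) 0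

-- magiczne_piatki: fuel only makes Python's well-founded recursion structural; under Pre_
-- the supplied fuel is proved sufficient and the 0-fuel branch is unreachable.
def magiczneA (fuel : Nat) (T : List Int) (p r k : Int) : Int :=
  match fuel with
  | 0 => 0
  | fuel+1 =>
    if r ≤ p then PySem.List.pyGetD T r 0
    else
      let Tm := (PySem.List.pyRange p (r+1) 5).foldl
          (fun acc i => acc ++ [mediana5A T i r]) []
      let n : Int := PySem.List.len Tm
      let mm := magiczneA fuel Tm 0 (n-1) (PySem.Int.floordiv n 2)
      let s := partitionA T p r mm
      if s.2 = k then PySem.List.pyGetD s.1 s.2 0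
      else if k < s.2 then magiczneA fuel s.1 p (s.2-1) k
      else magiczneA fuel s.1 (s.2+1) r k

def ksum (T : List Int) (k : Int) (p : Int) : Int :=
  (PySem.List.pyRange 0 (PySem.List.len T - p + 1) 1).foldl
    (fun suma i =>
      let T2 := PySem.List.slice T (some i) (some (i+p))
      suma + magiczneA (p.toNat + 1) T2 0 (p-1) (p-k))
    0

-- ===== PORT B =====
def ksum_alt (T : List Int) (k : Int) (p : Int) : Int :=
  ((PySem.List.pyRange 0 (PySem.List.len T - p + 1) 1).map
    (fun i => PySem.List.pyGetD
        (PySem.List.sorted (PySem.List.slice T (some i) (some (i+p))) (fun x => x) false)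
        (p - k) 0)).sum

-- ===== PRECONDITION & SPEC =====
-- Pre_ excludes p ≤ 0, where A raises IndexError on an empty window, and — when at least one
-- window exists — k outside [1,p], where the selection index p-k falls outside the window so
-- that A's leftover quickselect value and B's negative-index/IndexError behaviour are both
-- accidental and neither is the specified order statistic.
def Pre_ksum (T : List Int) (k : Int) (p : Int) : Prop :=
  1 ≤ p ∧ ((PySem.List.len T < p) ∨ (1 ≤ k ∧ k ≤ p))
instance (T : List Int) (k : Int) (p : Int) : Decidable (Pre_ksum T k p) := by
  unfold Pre_ksum; infer_instance

def pvWitness_ksum : List Int × Int × Int := ([5, 1, 4, 1, 3], 2, 3)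

def Spec_ksum (T : List Int) (k : Int) (p : Int) (out : Int) : Prop := out = ksum_alt T k p
instance (T : List Int) (k : Int) (p : Int) (out : Int) : Decidable (Spec_ksum T k p out) := by
  unfold Spec_ksum; infer_instance

-- ===== CLAIM (what is proved, stated in full; the proofs are below) =====
def Claim_equal_ksum : Prop := ∀ (T : List Int) (k : Int) (p : Int),
  Dom_ksum T k p → Pre_ksum T k p → Spec_ksum T k p (ksum T k p)

-- ===== LEMMAS AND PROOFS =====

theorem getD_mid (pre ys : List Int) (y : Int) (d : Int) :
    PySem.List.pyGetD (pre ++ y :: ys) (pre.length : Int) d = y := by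
  simp [PySem.List.pyGetD_natCast, List.getD_eq_getElem?_getD]


theorem pswap_self (T : List Int) (n : Nat) (h : n < T.length) :
    pswap T (n : Int) (n : Int) = T := by
  simp [pswap, PySem.List.pyGetD_natCast, PySem.List.pySetD_natCast]
  rw [List.getElem?_eq_getElem h]
  simp [List.set_getElem_self]


theorem pswap_split (pre mid suf : List Int) (a b : Int) :
    pswap (pre ++ a :: (mid ++ b :: suf)) (pre.length : Int)
      (((pre.length + (1 + mid.length) : Nat) : Int))
      = pre ++ b :: (mid ++ a :: suf) := by
  have h1 : PySem.List.pyGetD (pre ++ a :: (mid ++ b :: suf)) ((pre.length + (1 + mid.length) : Nat) : Int) 0 = b := by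
    have : pre ++ a :: (mid ++ b :: suf) = (pre ++ a :: mid) ++ b :: suf := by simp
    rw [this]
    have hl : pre.length + (1 + mid.length) = (pre ++ a :: mid).length := by simp; omega
    rw [hl]; exact getD_mid _ _ _ _
  have h2 : PySem.List.pyGetD (pre ++ a :: (mid ++ b :: suf)) (pre.length : Int) 0 = a :=
    getD_mid _ _ _ _
  have hc : ((pre.length + (1 + mid.length) : Nat) : Int) = ((pre.length + (1 + mid.length) : Nat) : Int) := rfl
  simp only [pswap, h1, h2]
  rw [show ((pre.length : Int)) = ((pre.length : Nat) : Int) from rfl]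
  rw [PySem.List.pySetD_natCast, PySem.List.pySetD_natCast]
  rw [List.set_append_right _ _ (by omega)]
  rw [List.set_append_right _ _ (by omega)]
  have e1 : pre.length - pre.length = 0 := by omega
  have e2 : pre.length + (1 + mid.length) - pre.length = 1 + mid.length := by omega
  rw [e1, e2, List.set_cons_zero]
  congr 1
  rw [show 1 + mid.length = mid.length + 1 by omega, List.set_cons_succ]
  congr 1
  rw [List.set_append_right _ _ (by omega)]
  simp

theorem lomuto (x : Int) (U : List Int) : ∀ (L G A Z : List Int),
    (∀ a ∈ L, a ≤ x) → (∀ a ∈ G, x < a) →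
    ∃ L' G',
      (PySem.List.pyRange ((A.length + L.length + G.length : Nat) : Int)
          ((A.length + L.length + G.length + U.length : Nat) : Int) 1).foldl
        (fun (s : List Int × Int) j =>
          if PySem.List.pyGetD s.1 j 0 ≤ x then (pswap s.1 (s.2+1) j, s.2+1) else s)
        (A ++ L ++ G ++ U ++ x :: Z, ((A.length + L.length : Nat) : Int) - 1)
      = (A ++ L' ++ G' ++ x :: Z, ((A.length + L'.length : Nat) : Int) - 1)
      ∧ (L' ++ G').Perm (L ++ G ++ U) ∧ (∀ a ∈ L', a ≤ x) ∧ (∀ a ∈ G', x < a) := by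
  induction U with
  | nil =>
    intro L G A Z hL hG
    refine ⟨L, G, ?_, by simp, hL, hG⟩
    rw [PySem.List.pyRange_one_eq_nil (by simp)]
    simp
  | cons u U' ih =>
    intro L G A Z hL hG
    have hab : ((A.length + L.length + G.length : Nat) : Int) < ((A.length + L.length + G.length + (u :: U').length : Nat) : Int) := by push_cast [List.length_cons]; omega
    rw [PySem.List.pyRange_one_cons hab, List.foldl_cons]
    have hpre : ((A.length + L.length + G.length : Nat) : Int) = (((A ++ L ++ G).length : Nat) : Int) := by
      push_cast; simp; omega
    have hget : PySem.List.pyGetD (A ++ L ++ G ++ (u :: (U' ++ x :: Z))) ((A.length + L.length + G.length : Nat) : Int) 0 = u := by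
      rw [hpre]
      exact getD_mid (A ++ L ++ G) _ u 0
    have hshape : A ++ L ++ G ++ (u :: U') ++ x :: Z = A ++ L ++ G ++ (u :: (U' ++ x :: Z)) := by simp
    rw [hshape, hget]
    by_cases hux : u ≤ x
    · simp only [if_pos hux]
      have hi : ((A.length + L.length : Nat) : Int) - 1 + 1 = ((A ++ L).length : Nat) := by push_cast; simp
      rw [hi]
      rcases G with - | ⟨g, G2⟩
      · simp only [List.length_nil, List.append_nil, Nat.add_zero] at *
        have hswap : pswap (A ++ L ++ (u :: (U' ++ x :: Z))) (((A ++ L).length : Nat) : Int)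
            ((A.length + L.length : Nat) : Int) = A ++ L ++ (u :: (U' ++ x :: Z)) := by
          have hc : ((A.length + L.length : Nat) : Int) = (((A ++ L).length : Nat) : Int) := by simp
          rw [hc]
          have hlen : (A ++ L).length < (A ++ L ++ (u :: (U' ++ x :: Z))).length := by simp
          exact pswap_self (A ++ L ++ (u :: (U' ++ x :: Z))) (A ++ L).length hlen
        rw [hswap]
        have h2 : A ++ L ++ (u :: (U' ++ x :: Z)) = A ++ (L ++ [u]) ++ [] ++ U' ++ x :: Z := by simp
        rw [h2]
        have := ih (L ++ [u]) [] A Z (by intro w hw; rcases List.mem_append.mp hw with h | h; exacts [hL w h, by simp at h; omega]) (by simp)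
        obtain ⟨L', G', heq, hperm, hL', hG'⟩ := this
        refine ⟨L', G', ?_, ?_, hL', hG'⟩
        · rw [← heq]; congr 2 <;> simp <;> omega
        · refine hperm.trans ?_
          rw [List.perm_iff_count]; intro c
          simp [List.count_append, List.count_cons]
      · simp only [List.length_cons] at *
        have hsplit : A ++ L ++ (g :: G2) ++ (u :: (U' ++ x :: Z))
            = (A ++ L) ++ g :: (G2 ++ u :: (U' ++ x :: Z)) := by simp
        have hpos : ((A.length + L.length + (G2.length + 1) : Nat) : Int)
            = (((A ++ L).length + (1 + G2.length) : Nat) : Int) := by push_cast; omega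
        rw [hsplit, hpos]
        rw [pswap_split (A ++ L) G2 (U' ++ x :: Z) g u]
        have h2 : (A ++ L) ++ u :: (G2 ++ g :: (U' ++ x :: Z)) = A ++ (L ++ [u]) ++ (G2 ++ [g]) ++ U' ++ x :: Z := by simp
        rw [h2]
        have := ih (L ++ [u]) (G2 ++ [g]) A Z
          (by intro w hw; rcases List.mem_append.mp hw with h | h; exacts [hL w h, by simp at h; omega])
          (by intro w hw; rcases List.mem_append.mp hw with h | h; exacts [hG w (by simp [h]), by simp at h; subst h; exact hG _ (by simp)])
        obtain ⟨L', G', heq, hperm, hL', hG'⟩ := this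
        refine ⟨L', G', ?_, ?_, hL', hG'⟩
        · rw [← heq]; congr 2 <;> simp <;> omega
        · refine hperm.trans ?_
          rw [List.perm_iff_count]; intro c
          simp [List.count_append, List.count_cons]
          try split_ifs <;> omega
    · simp only [if_neg hux]
      have h2 : A ++ L ++ G ++ (u :: (U' ++ x :: Z)) = A ++ L ++ (G ++ [u]) ++ U' ++ x :: Z := by simp
      rw [h2]
      have := ih L (G ++ [u]) A Z hL
        (by intro w hw; rcases List.mem_append.mp hw with h | h; exacts [hG w h, by simp at h; subst h; omega])
      obtain ⟨L', G', heq, hperm, hL', hG'⟩ := this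
      refine ⟨L', G', ?_, ?_, hL', hG'⟩
      · rw [← heq]; congr 2 <;> simp <;> omega
      · refine hperm.trans ?_
        rw [List.perm_iff_count]; intro c
        simp [List.count_append, List.count_cons]

-- after the find-and-swap, the pivot k sits at the end of the segment
theorem swap_to_end (A M Z : List Int) (k : Int) (hk : k ∈ M) :
    ∃ W, pswap (A ++ M ++ Z)
        (((PySem.List.pyRange ((A.length : Nat) : Int) (((A.length : Nat) : Int) + ((M.length : Nat) : Int) - 1 + 1) 1).find?
            (fun i => PySem.List.pyGetD (A ++ M ++ Z) i 0 == k)).getD (((A.length : Nat) : Int) + ((M.length : Nat) : Int) - 1))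
        (((A.length : Nat) : Int) + ((M.length : Nat) : Int) - 1)
      = A ++ W ++ k :: Z ∧ (W ++ [k]).Perm M := by
  have hMne : M ≠ [] := List.ne_nil_of_mem hk
  have hMlen : 1 ≤ M.length := List.length_pos_of_ne_nil hMne
  -- the predicate holds somewhere in the range
  have hidx : ∃ n : Nat, n < M.length ∧ M[n]? = some k := by
    obtain ⟨n, hn, he⟩ := List.getElem_of_mem hk
    exact ⟨n, hn, by rw [List.getElem?_eq_getElem hn, he]⟩
  obtain ⟨n, hn, he⟩ := hidx
  have hone : (((A.length : Nat) : Int) + ((M.length : Nat) : Int) - 1 + 1) = ((A.length + M.length : Nat) : Int) := by push_cast; ring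
  rw [hone]
  have hmem : ((A.length + n : Nat) : Int) ∈ PySem.List.pyRange ((A.length : Nat) : Int) ((A.length + M.length : Nat) : Int) 1 := by
    rw [PySem.List.mem_pyRange_one]; push_cast; omega
  have hpred : (fun i => PySem.List.pyGetD (A ++ M ++ Z) i 0 == k) ((A.length + n : Nat) : Int) = true := by
    simp only [PySem.List.pyGetD_natCast, beq_iff_eq]
    rw [List.append_assoc, List.getD_append_right _ _ _ _ (by omega)]
    have : A.length + n - A.length = n := by omega
    rw [this, List.getD_append _ _ _ _ (by omega)]
    simp [List.getD_eq_getElem?_getD, he]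
  have hsome : ((PySem.List.pyRange ((A.length : Nat) : Int) ((A.length + M.length : Nat) : Int) 1).find?
      (fun i => PySem.List.pyGetD (A ++ M ++ Z) i 0 == k)).isSome := by
    rw [List.find?_isSome]; exact ⟨_, hmem, hpred⟩
  obtain ⟨m, hm⟩ := Option.isSome_iff_exists.mp hsome
  rw [hm, Option.getD_some]
  have hmmem := List.mem_of_find?_eq_some hm
  rw [PySem.List.mem_pyRange_one] at hmmem
  have hmpred := List.find?_some hm
  -- m is an in-range index holding k
  obtain ⟨hm1, hm2⟩ := hmmem
  have hm0 : 0 ≤ m := le_trans (by positivity) hm1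
  set j : Nat := m.toNat - A.length with hj
  have hjlt : j < M.length := by omega
  have hmj : m = ((A.length + j : Nat) : Int) := by push_cast; omega
  have hMsplit : M = M.take j ++ M[j] :: M.drop (j+1) := by
    conv_lhs => rw [← List.take_append_drop j M]
    congr 1
    exact (List.getElem_cons_drop hjlt).symm
  have hMk : M[j] = k := by
    simp only [PySem.List.pyGetD_natCast, beq_iff_eq, hmj] at hmpred
    rw [List.append_assoc, List.getD_append_right _ _ _ _ (by omega)] at hmpred
    have e : A.length + j - A.length = j := by omega
    rw [e, List.getD_append _ _ _ _ (by omega)] at hmpred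
    rw [List.getD_eq_getElem _ _ (by omega)] at hmpred
    exact hmpred
  rcases List.eq_nil_or_concat (M.drop (j+1)) with hnil | ⟨M2', z, hconc⟩
  · -- k is the last element of M: the swap is a self-swap
    have hjlast : j = M.length - 1 := by
      have := congrArg List.length hnil
      simp at this; omega
    refine ⟨M.take j, ?_, ?_⟩
    · have hr : (((A.length : Nat) : Int) + ((M.length : Nat) : Int) - 1) = ((A.length + j : Nat) : Int) := by push_cast; omega
      rw [hr, hmj]
      have hlen : A.length + j < (A ++ M ++ Z).length := by simp; omega
      rw [pswap_self (A ++ M ++ Z) (A.length + j) hlen]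
      conv_lhs => rw [hMsplit]
      rw [hnil, hMk]
      simp
    · conv_rhs => rw [hMsplit]
      rw [hnil, hMk]
  · -- k is swapped with the last element z
    have hlen2 : M.length = j + 1 + M2'.length + 1 := by
      have := congrArg List.length hconc
      simp at this; omega
    refine ⟨M.take j ++ z :: M2', ?_, ?_⟩
    · have hshape : A ++ M ++ Z = (A ++ M.take j) ++ k :: (M2' ++ z :: Z) := by
        conv_lhs => rw [hMsplit, hconc, hMk]
        simp
      rw [hshape]
      have hp1 : m = (((A ++ M.take j).length : Nat) : Int) := by
        simp [hmj]; omega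
      have hp2 : (((A.length : Nat) : Int) + ((M.length : Nat) : Int) - 1)
          = (((A ++ M.take j).length + (1 + M2'.length) : Nat) : Int) := by
        simp; omega
      rw [hp1, hp2, pswap_split (A ++ M.take j) M2' Z k z]
      simp
    · conv_rhs => rw [hMsplit, hconc, hMk]
      rw [List.perm_iff_count]; intro c
      simp [List.count_append, List.count_cons]
      try split_ifs <;> omega

theorem partitionA_spec (A M Z : List Int) (k : Int) (hk : k ∈ M) :
    ∃ L G, partitionA (A ++ M ++ Z) ((A.length : Nat) : Int)
        (((A.length : Nat) : Int) + ((M.length : Nat) : Int) - 1) k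
      = (A ++ L ++ k :: G ++ Z, ((A.length + L.length : Nat) : Int))
      ∧ (L ++ k :: G).Perm M ∧ (∀ a ∈ L, a ≤ k) ∧ (∀ a ∈ G, k < a) := by
  obtain ⟨W, hswap, hWperm⟩ := swap_to_end A M Z k hk
  have hWlen : W.length + 1 = M.length := by
    have := hWperm.length_eq; simp at this; omega
  simp only [partitionA]
  rw [hswap]
  have hx : PySem.List.pyGetD (A ++ W ++ k :: Z) (((A.length : Nat) : Int) + ((M.length : Nat) : Int) - 1) 0 = k := by
    have hr : (((A.length : Nat) : Int) + ((M.length : Nat) : Int) - 1) = (((A ++ W).length : Nat) : Int) := by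
      simp; omega
    rw [hr, show A ++ W ++ k :: Z = (A ++ W) ++ k :: Z by simp]
    exact getD_mid (A ++ W) Z k 0
  rw [hx]
  obtain ⟨L', G', hfold, hperm, hL', hG'⟩ := lomuto k W [] [] A Z (by simp) (by simp)
  simp only [List.append_nil, List.length_nil, Nat.add_zero] at hfold
  have hrange : PySem.List.pyRange ((A.length : Nat) : Int) (((A.length : Nat) : Int) + ((M.length : Nat) : Int) - 1) 1
      = PySem.List.pyRange ((A.length : Nat) : Int) ((A.length + W.length : Nat) : Int) 1 := by
    congr 1; push_cast; omega
  have hinit : A ++ W ++ k :: Z = A ++ (W ++ k :: Z) := by simp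
  have hinit2 : ((A.length : Nat) : Int) - 1 = ((A.length : Nat) : Int) - 1 := rfl
  rw [hrange]
  have hfold' : (PySem.List.pyRange ((A.length : Nat) : Int) ((A.length + W.length : Nat) : Int) 1).foldl
      (fun (s : List Int × Int) j =>
        if PySem.List.pyGetD s.1 j 0 ≤ k then (pswap s.1 (s.2+1) j, s.2+1) else s)
      (A ++ W ++ k :: Z, ((A.length : Nat) : Int) - 1)
      = (A ++ L' ++ G' ++ k :: Z, ((A.length + L'.length : Nat) : Int) - 1) := by
    rw [← hfold]
  rw [hfold']
  have hlen' : L'.length + G'.length = W.length := by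
    have := hperm.length_eq; simp at this; omega
  rcases G' with - | ⟨g, G2⟩
  · refine ⟨L', [], ?_, ?_, hL', by simp⟩
    · have hq : ((A.length + L'.length : Nat) : Int) - 1 + 1 = ((A.length + L'.length : Nat) : Int) := by ring
      have hr2 : (((A.length : Nat) : Int) + ((M.length : Nat) : Int) - 1) = ((A.length + L'.length : Nat) : Int) := by
        push_cast; simp at hlen'; omega
      rw [hq, hr2]
      have hlt : A.length + L'.length < (A ++ L' ++ [] ++ k :: Z).length := by simp
      rw [pswap_self _ _ hlt]
      simp
    · refine ?_
      have h1 : (L' ++ k :: ([] : List Int)) = L' ++ [k] := rfl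
      rw [List.perm_iff_count]; intro c
      have hc1 := hperm.count_eq c
      have hc2 := hWperm.count_eq c
      simp [List.count_append, List.count_cons] at *
      omega
  · refine ⟨L', G2 ++ [g], ?_, ?_, hL', ?_⟩
    · have hq : ((A.length + L'.length : Nat) : Int) - 1 + 1 = ((A.length + L'.length : Nat) : Int) := by ring
      rw [hq]
      have hshape : A ++ L' ++ g :: G2 ++ k :: Z = (A ++ L') ++ g :: (G2 ++ k :: Z) := by simp
      rw [hshape]
      have hp1 : ((A.length + L'.length : Nat) : Int) = (((A ++ L').length : Nat) : Int) := by simp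
      have hp2 : (((A.length : Nat) : Int) + ((M.length : Nat) : Int) - 1)
          = (((A ++ L').length + (1 + G2.length) : Nat) : Int) := by
        simp at hlen' ⊢; omega
      rw [hp1, hp2, pswap_split (A ++ L') G2 Z g k]
      simp
    · rw [List.perm_iff_count]; intro c
      have hc1 := hperm.count_eq c
      have hc2 := hWperm.count_eq c
      simp [List.count_append, List.count_cons] at *
      omega
    · intro a ha
      rcases List.mem_append.mp ha with h | h
      · exact hG' a (by simp [h])
      · simp at h; subst h; exact hG' _ (by simp)

theorem pswap_adj_perm (T : List Int) (j : Int) (h0 : 0 ≤ j) (h1 : j + 1 < (T.length : Int)) :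
    (pswap T j (j+1)).Perm T := by
  obtain ⟨n, rfl⟩ : ∃ n : Nat, j = (n : Int) := ⟨j.toNat, by omega⟩
  have hlt : n + 1 < T.length := by omega
  have hsplit : T = T.take n ++ T[n] :: ([] ++ T[n+1] :: T.drop (n+1+1)) := by
    conv_lhs => rw [← List.take_append_drop n T]
    congr 1
    rw [← List.getElem_cons_drop (as := T) (i := n) (by omega)]
    simp only [List.nil_append]
    congr 1
    rw [← List.getElem_cons_drop (as := T) (i := n+1) hlt]
  have e1 : ((n : Nat) : Int) = (((T.take n).length : Nat) : Int) := by
    simp [List.length_take]; omega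
  have e3 : (((T.take n).length : Nat) : Int) + 1
      = (((T.take n).length + (1 + ([] : List Int).length) : Nat) : Int) := by
    simp
  conv_lhs => rw [hsplit]
  rw [e1, e3, pswap_split]
  conv_rhs => rw [hsplit]
  refine List.Perm.append_left _ ?_
  simp only [List.nil_append]
  exact List.Perm.swap _ _ _

theorem foldl_perm {ι : Type} (f : List Int → ι → List Int) (l : List ι) (T : List Int)
    (hf : ∀ T' x, x ∈ l → T'.Perm T → (f T' x).Perm T') :
    (l.foldl f T).Perm T := by
  suffices h : ∀ T₀ : List Int, T₀.Perm T → (l.foldl f T₀).Perm T by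
    exact h T (List.Perm.refl T)
  induction l with
  | nil => intro T₀ h; simpa using h
  | cons x xs ih =>
    intro T₀ h
    rw [List.foldl_cons]
    exact ih (fun T' y hy hp => hf T' y (by simp [hy]) hp) (f T₀ x)
      ((hf T₀ x (by simp) h).trans h)

theorem bubbleSortA_perm (T : List Int) : (bubbleSortA T).Perm T := by
  simp only [bubbleSortA, PySem.List.len]
  refine foldl_perm _ _ T ?_
  intro T' i hi hpi
  refine foldl_perm _ _ T' ?_
  intro T'' j hj hpj
  split_ifs with hc
  · rw [PySem.List.mem_pyRange_one] at hi hj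
    have hlen : T''.length = T.length := by
      rw [hpj.length_eq, hpi.length_eq]
    exact pswap_adj_perm T'' j hj.1 (by rw [hlen]; omega)
  · exact List.Perm.refl _

theorem getD_seg_mem (A M Z : List Int) (u : Int) (h1 : (A.length : Int) ≤ u)
    (h2 : u < (A.length : Int) + (M.length : Int)) :
    PySem.List.pyGetD (A ++ M ++ Z) u 0 ∈ M := by
  have h0 : 0 ≤ u := le_trans (by positivity) h1
  rw [PySem.List.pyGetD_of_nonneg _ _ h0]
  rw [List.append_assoc, List.getD_append_right _ _ _ _ (by omega)]
  rw [List.getD_append _ _ _ _ (by omega)]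
  rw [List.getD_eq_getElem _ _ (by omega)]
  exact List.getElem_mem _

theorem mediana5A_mem (A M Z : List Int) (i : Int) (hi1 : (A.length : Int) ≤ i)
    (hi2 : i ≤ (A.length : Int) + (M.length : Int) - 1) :
    mediana5A (A ++ M ++ Z) i ((A.length : Int) + (M.length : Int) - 1) ∈ M := by
  simp only [mediana5A]
  set r : Int := (A.length : Int) + (M.length : Int) - 1 with hr
  set q : Int := if 5 ≤ r - i + 1 then 5 else r - i with hq
  have hq0 : 0 ≤ q := by
    rw [hq]; split_ifs with h; omega; omega
  have hqle : i + q - 1 ≤ r := by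
    rw [hq]; split_ifs with h; omega; omega
  rw [PySem.List.foldl_append_singleton_eq_map]
  simp only [List.nil_append]
  set T2 := (PySem.List.pyRange 0 q 1).map (fun t => PySem.List.pyGetD (A ++ M ++ Z) (i+t) 0) with hT2
  have hT2mem : ∀ a ∈ T2, a ∈ M := by
    intro a ha
    rw [hT2, List.mem_map] at ha
    obtain ⟨t, ht, hv⟩ := ha
    rw [PySem.List.mem_pyRange_one] at ht
    rw [← hv]
    exact getD_seg_mem A M Z (i+t) (by omega) (by omega)
  have hblen : (bubbleSortA T2).length = T2.length := (bubbleSortA_perm T2).length_eq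
  have hbmem : ∀ a ∈ bubbleSortA T2, a ∈ M := fun a ha => hT2mem a ((bubbleSortA_perm T2).mem_iff.mp ha)
  have hT2len : T2.length = q.toNat := by
    rw [hT2, List.length_map, PySem.List.pyRange_one, List.length_map, List.length_range]
    congr 1; omega
  split_ifs with hzero
  · -- empty: the appended T[p] is selected
    have hq2 : PySem.Int.floordiv q 2 = 0 := by
      have : q = 0 := by omega
      rw [this]; decide
    rw [hq2]
    have hbe : bubbleSortA T2 = [] := List.eq_nil_of_length_eq_zero hzero
    rw [hbe]
    simp only [List.nil_append]
    rw [show (0 : Int) = ((0 : Nat) : Int) from rfl, PySem.List.pyGetD_natCast]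
    simp only [List.getD_cons_zero]
    exact getD_seg_mem A M Z i (by omega) (by omega)
  · have hq1 : 1 ≤ q.toNat := by omega
    have hfd : PySem.Int.floordiv q 2 = ((q.toNat / 2 : Nat) : Int) := by
      rw [show q = ((q.toNat : Nat) : Int) by omega]
      rw [show (2 : Int) = ((2 : Nat) : Int) from rfl]
      exact_mod_cast PySem.Int.floordiv_natCast q.toNat 2
    rw [hfd, PySem.List.pyGetD_natCast]
    have hlt : q.toNat / 2 < (bubbleSortA T2).length := by
      rw [hblen, hT2len]; omega
    rw [List.getD_eq_getElem _ _ hlt]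
    exact hbmem _ (List.getElem_mem _)

theorem sorted_append_pivot (M L G : List Int) (x : Int)
    (hperm : (L ++ x :: G).Perm M) (hL : ∀ a ∈ L, a ≤ x) (hG : ∀ a ∈ G, x < a) :
    PySem.List.sorted M (fun v => v) false
      = PySem.List.sorted L (fun v => v) false ++ x :: PySem.List.sorted G (fun v => v) false := by
  refine PySem.List.sorted_id_eq_of_perm_of_pairwise M _ ?_ ?_
  · refine List.Perm.trans ?_ hperm
    refine List.Perm.append (PySem.List.sorted_perm L _ false) ?_
    exact List.Perm.cons x (PySem.List.sorted_perm G _ false)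
  · rw [List.pairwise_append]
    refine ⟨PySem.List.sorted_pairwise L _, ?_, ?_⟩
    · rw [List.pairwise_cons]
      refine ⟨?_, PySem.List.sorted_pairwise G _⟩
      intro a ha
      exact (hG a ((PySem.List.sorted_perm G _ false).mem_iff.mp ha)).le
    · intro a ha b hb
      have ha' := hL a ((PySem.List.sorted_perm L _ false).mem_iff.mp ha)
      rcases List.mem_cons.mp hb with h | h
      · omega
      · have := hG b ((PySem.List.sorted_perm G _ false).mem_iff.mp h)
        omega

theorem magiczneA_spec (fuel : Nat) : ∀ (A M Z : List Int) (j : Nat),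
    j < M.length → M.length ≤ fuel →
    magiczneA fuel (A ++ M ++ Z) ((A.length : Nat) : Int)
      (((A.length : Nat) : Int) + ((M.length : Nat) : Int) - 1)
      (((A.length : Nat) : Int) + (j : Int))
      = (PySem.List.sorted M (fun v => v) false).getD j 0 := by
  induction fuel with
  | zero => intro A M Z j hj hf; omega
  | succ f ih =>
    intro A M Z j hj hf
    rw [magiczneA]
    by_cases hbase : ((A.length : Nat) : Int) + ((M.length : Nat) : Int) - 1 ≤ ((A.length : Nat) : Int)
    · rw [if_pos hbase]
      have hM1 : M.length = 1 := by omega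
      have hj0 : j = 0 := by omega
      obtain ⟨m0, hm0⟩ : ∃ m0, M = [m0] := by
        rcases M with - | ⟨a, - | ⟨b, t⟩⟩
        · simp at hM1
        · exact ⟨a, rfl⟩
        · simp at hM1
      subst hm0 hj0
      have hr : ((A.length : Nat) : Int) + ((1 : Nat) : Int) - 1 = ((A.length : Nat) : Int) := by push_cast; ring
      simp only [List.length_cons, List.length_nil] at *
      rw [show ((A.length:Nat):Int) + (((0:Nat)+1 : Nat):Int) - 1 = ((A.length : Nat) : Int) by push_cast; ring]
      rw [show A ++ [m0] ++ Z = A ++ m0 :: Z by simp]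
      rw [getD_mid A Z m0 0]
      rfl
    · rw [if_neg hbase]
      have hM2 : 2 ≤ M.length := by omega
      have hone : (((A.length : Nat) : Int) + ((M.length : Nat) : Int) - 1 + 1) = ((A.length : Nat) : Int) + ((M.length : Nat) : Int) := by ring
      simp only [PySem.List.foldl_append_singleton_eq_map, List.nil_append, PySem.List.len_eq, hone]
      have hr : (((A.length : Nat) : Int) + ((M.length : Nat) : Int) - 1) = (((A.length : Nat) : Int) + ((M.length : Nat) : Int) - 1) := rfl
      set Tm := (PySem.List.pyRange ((A.length : Nat) : Int) (((A.length : Nat) : Int) + ((M.length : Nat) : Int)) 5).map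
          (fun i => mediana5A (A ++ M ++ Z) i (((A.length : Nat) : Int) + ((M.length : Nat) : Int) - 1)) with hTm
      have hTmlen : Tm.length = ((((M.length : Nat) : Int) + 4) / 5).toNat := by
        rw [hTm, List.length_map, PySem.List.pyRange_of_pos _ _ (by omega), List.length_map, List.length_range]
        rw [if_pos (by omega)]
        congr 1; ring_nf
      have hTm1 : 1 ≤ Tm.length := by rw [hTmlen]; omega
      have hTmle : Tm.length ≤ M.length - 1 := by rw [hTmlen]; omega
      have hTmmem : ∀ a ∈ Tm, a ∈ M := by
        intro a ha
        rw [hTm, List.mem_map] at ha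
        obtain ⟨i, hi, hv⟩ := ha
        rw [PySem.List.mem_pyRange_iff_of_pos (by omega)] at hi
        rw [← hv]
        exact mediana5A_mem A M Z i hi.1 (by omega)
      -- the recursive median-of-medians call
      have hmm : magiczneA f Tm 0 (((Tm.length : Nat) : Int) - 1) (PySem.Int.floordiv ((Tm.length : Nat) : Int) 2)
          = (PySem.List.sorted Tm (fun v => v) false).getD (Tm.length / 2) 0 := by
        have hd : PySem.Int.floordiv ((Tm.length : Nat) : Int) 2 = ((Tm.length / 2 : Nat) : Int) := by
          exact_mod_cast PySem.Int.floordiv_natCast Tm.length 2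
        rw [hd]
        have := ih [] Tm [] (Tm.length / 2) (by omega) (by omega)
        simp only [List.nil_append, List.append_nil, List.length_nil, Nat.cast_zero, zero_add] at this
        exact this
      rw [hmm]
      set mm := (PySem.List.sorted Tm (fun v => v) false).getD (Tm.length / 2) 0 with hmmdef
      have hmmM : mm ∈ M := by
        apply hTmmem
        rw [← (PySem.List.sorted_perm Tm (fun v => v) false).mem_iff]
        rw [hmmdef, List.getD_eq_getElem _ _ (by rw [(PySem.List.sorted_perm Tm (fun v => v) false).length_eq]; omega)]
        exact List.getElem_mem _
      obtain ⟨L, G, heq, hperm, hL, hG⟩ := partitionA_spec A M Z mm hmmM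
      rw [heq]
      have hlenLG : L.length + G.length + 1 = M.length := by
        have := hperm.length_eq; simp at this; omega
      have hsorted := sorted_append_pivot M L G mm hperm hL hG
      have hsLlen : (PySem.List.sorted L (fun v => v) false).length = L.length :=
        (PySem.List.sorted_perm L (fun v => v) false).length_eq
      by_cases hq : ((A.length + L.length : Nat) : Int) = ((A.length : Nat) : Int) + (j : Int)
      · rw [if_pos hq]
        have hjL : j = L.length := by omega
        have hget : PySem.List.pyGetD (A ++ L ++ mm :: G ++ Z) ((A.length + L.length : Nat) : Int) 0 = mm := by
          rw [show A ++ L ++ mm :: G ++ Z = (A ++ L) ++ mm :: (G ++ Z) by simp]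
          rw [show ((A.length + L.length : Nat) : Int) = (((A ++ L).length : Nat) : Int) by simp]
          exact getD_mid (A ++ L) (G ++ Z) mm 0
        rw [hget, hsorted, hjL]
        rw [List.getD_append_right _ _ _ _ (by omega)]
        rw [hsLlen]
        simp
      · rw [if_neg hq]
        by_cases hlt : ((A.length : Nat) : Int) + (j : Int) < ((A.length + L.length : Nat) : Int)
        · rw [if_pos hlt]
          have hjL : j < L.length := by omega
          have hshape : A ++ L ++ mm :: G ++ Z = A ++ L ++ (mm :: (G ++ Z)) := by simp
          have hL2 : L.length ≤ f := by omega
          have := ih A L (mm :: (G ++ Z)) j hjL hL2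
          rw [hshape]
          have harg1 : ((A.length + L.length : Nat) : Int) - 1 = ((A.length : Nat) : Int) + ((L.length : Nat) : Int) - 1 := by push_cast; ring
          rw [harg1, this, hsorted]
          rw [List.getD_append _ _ _ _ (by omega)]
        · rw [if_neg hlt]
          have hjL : L.length < j := by omega
          set A' := A ++ L ++ [mm] with hA'
          have hA'len : A'.length = A.length + L.length + 1 := by simp [hA']; omega
          have hshape : A ++ L ++ mm :: G ++ Z = A' ++ G ++ Z := by simp [hA']
          have hj' : j - L.length - 1 < G.length := by omega
          have hG2 : G.length ≤ f := by omega
          have := ih A' G Z (j - L.length - 1) hj' hG2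
          rw [hshape]
          have harg1 : ((A.length + L.length : Nat) : Int) + 1 = ((A'.length : Nat) : Int) := by
            rw [hA'len]; push_cast; ring
          have harg2 : (((A.length : Nat) : Int) + ((M.length : Nat) : Int) - 1) = ((A'.length : Nat) : Int) + ((G.length : Nat) : Int) - 1 := by
            rw [hA'len]; push_cast; omega
          have harg3 : ((A.length : Nat) : Int) + (j : Int) = ((A'.length : Nat) : Int) + ((j - L.length - 1 : Nat) : Int) := by
            rw [hA'len]; push_cast; omega
          rw [harg1, harg2, harg3, this, hsorted]
          rw [List.getD_append_right _ _ _ _ (by omega)]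
          rw [hsLlen]
          have : j - L.length = (j - L.length - 1) + 1 := by omega
          rw [this, List.getD_cons_succ]
          simp

theorem ksum_eq (T : List Int) (k : Int) (p : Int)
    (hpre : 1 ≤ p ∧ ((PySem.List.len T < p) ∨ (1 ≤ k ∧ k ≤ p))) :
    ksum T k p = ksum_alt T k p := by
  obtain ⟨hp1, hpre2⟩ := hpre
  rw [PySem.List.len_eq] at hpre2
  simp only [ksum, ksum_alt, PySem.List.len_eq]
  by_cases hnp : (T.length : Int) - p + 1 ≤ 0
  · rw [PySem.List.pyRange_one_eq_nil (by omega)]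
    simp
  · have hplen : p ≤ (T.length : Int) := by omega
    have hk : 1 ≤ k ∧ k ≤ p := by
      rcases hpre2 with h | h
      · omega
      · exact h
    rw [PySem.List.foldl_add]
    rw [zero_add]
    congr 1
    apply List.map_congr_left
    intro i hi
    rw [PySem.List.mem_pyRange_one] at hi
    obtain ⟨a, rfl⟩ : ∃ a : Nat, i = (a : Int) := ⟨i.toNat, by omega⟩
    obtain ⟨q, hq⟩ : ∃ q : Nat, p = (q : Int) := ⟨p.toNat, by omega⟩
    subst hq
    rw [PySem.List.slice_natCast_add]
    set w := List.take q (List.drop a T) with hw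
    have hwlen : w.length = q := by
      rw [hw, List.length_take, List.length_drop]
      omega
    obtain ⟨j, hj⟩ : ∃ j : Nat, (q : Int) - k = (j : Int) := ⟨((q : Int) - k).toNat, by omega⟩
    have hjlt : j < w.length := by rw [hwlen]; omega
    have := magiczneA_spec ((q : Int).toNat + 1) [] w [] j hjlt (by simp at hwlen ⊢; omega)
    simp only [List.nil_append, List.append_nil, List.length_nil, Nat.cast_zero, zero_add] at this
    rw [hwlen] at this
    rw [show (q : Int) - 1 = (q : Int) - 1 from rfl] at this
    rw [hj, this]
    rw [PySem.List.pyGetD_of_nonneg _ _ (by omega)]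
    simp


-- ===== VERDICT (by name: the statement is the Claim_ definition above) =====
theorem ksum_spec : Claim_equal_ksum := by
  intro T k p _ hpre
  unfold Spec_ksum
  exact ksum_eq T k p hpre
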